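-- pv_equiv track=rewrite | github.com/alyons/aoc_python | main_24_ex.py | segment_instructions
-- ===== SOURCE A (Python) =====
-- def segment_instructions(instructions: list[str]):
--     segments = []
--     indecies = [i for i,v in enumerate(instructions) if 'inp' in v]
--
--     for i in range(len(indecies)):
--         if i < len(indecies) - 1:
--             segments.append(instructions[indecies[i]:indecies[i + 1]])
--         else:
--             segments.append(instructions[indecies[i]:])
--
--     return segments
-- ===== SOURCE B (Python) =====
-- def segment_instructions(instructions: list[str]):
--     segments = []
--     current = None
--     for line in instructions:
--         if 'inp' in line:
--             if current is not None:
--                 segments.append(current)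
--             current = [line]
--         elif current is not None:
--             current.append(line)
--     if current is not None:
--         segments.append(current)
--     return segments
-- ===== Notes on version B (the rewrite author's own statement) =====
-- stated objective: simpler
-- what changed: Replaces the index-table-plus-slicing (collect all 'inp' positions, then slice between consecutive indices) with a single linear pass that maintains the current open segment and closes it at each 'inp' line.
import Mathlib
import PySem

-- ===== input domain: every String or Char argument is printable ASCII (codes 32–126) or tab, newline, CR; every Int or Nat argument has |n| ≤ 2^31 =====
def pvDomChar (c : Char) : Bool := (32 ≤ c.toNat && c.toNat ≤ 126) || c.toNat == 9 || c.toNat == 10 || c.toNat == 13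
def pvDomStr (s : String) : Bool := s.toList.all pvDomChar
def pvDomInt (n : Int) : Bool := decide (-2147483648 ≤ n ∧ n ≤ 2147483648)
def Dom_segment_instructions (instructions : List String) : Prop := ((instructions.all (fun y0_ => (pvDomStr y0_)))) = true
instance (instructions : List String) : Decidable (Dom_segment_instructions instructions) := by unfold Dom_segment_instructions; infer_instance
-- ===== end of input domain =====

-- B replaces A's index-table-plus-slicing with a single pass keeping the current open segment; same return value, proved equal.


-- ===== PORT A =====
def segment_instructions (instructions : List String) : List (List String) :=
  let indecies : List Int :=
    ((PySem.List.enumerate instructions).filter (fun iv => PySem.Str.isIn "inp" iv.2)).map (fun iv => iv.1)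
  (PySem.List.pyRange 0 (PySem.List.len indecies) 1).foldl
    (fun segments i =>
      if i < PySem.List.len indecies - 1 then
        segments ++ [PySem.List.slice instructions (some (PySem.List.pyGetD indecies i 0)) (some (PySem.List.pyGetD indecies (i + 1) 0))]
      else
        segments ++ [PySem.List.slice instructions (some (PySem.List.pyGetD indecies i 0)) none])
    []

-- ===== PORT B =====
def pvStepB (st : List (List String) × Option (List String)) (line : String) :
    List (List String) × Option (List String) :=
  if PySem.Str.isIn "inp" line then
    match st.2 with
    | some cur => (st.1 ++ [cur], some [line])
    | none => (st.1, some [line])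
  else
    match st.2 with
    | some cur => (st.1, some (cur ++ [line]))
    | none => st

def segment_instructions_alt (instructions : List String) : List (List String) :=
  let st := instructions.foldl pvStepB ([], none)
  match st.2 with
  | some cur => st.1 ++ [cur]
  | none => st.1

-- ===== PRECONDITION & SPEC =====
def Spec_segment_instructions (instructions : List String) (out : List (List String)) : Prop := out = segment_instructions_alt instructions
instance (instructions : List String) (out : List (List String)) : Decidable (Spec_segment_instructions instructions out) := by unfold Spec_segment_instructions; infer_instance

-- ===== CLAIM (what is proved, stated in full; the proofs are below) =====
def Claim_equal_segment_instructions : Prop := ∀ (instructions : List String), Dom_segment_instructions instructions → Spec_segment_instructions instructions (segment_instructions instructions)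

-- ===== LEMMAS AND PROOFS =====

-- positions of the lines satisfying p, built structurally
def pvIdxP (p : String → Bool) : List String → List Nat
  | [] => []
  | x :: xs => if p x then 0 :: (pvIdxP p xs).map (· + 1) else (pvIdxP p xs).map (· + 1)

-- the slice-between-consecutive-indices shape of A, over Nat indices
def pvF : List String → List Nat → List (List String)
  | _, [] => []
  | xs, [i] => [xs.drop i]
  | xs, i :: j :: rest => ((xs.drop i).take (j - i)) :: pvF xs (j :: rest)

-- canonical recursive splitter
def pvGP (p : String → Bool) : List String → List (List String)
  | [] => []
  | x :: xs =>
    if p x then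
      (x :: xs.takeWhile (fun s => !p s)) :: pvGP p (xs.dropWhile (fun s => !p s))
    else pvGP p xs
termination_by xs => xs.length
decreasing_by
  · simpa using Nat.lt_succ_of_le (List.length_dropWhile_le _ _)
  · simp

theorem pvGP_nil (p : String → Bool) : pvGP p [] = [] := by rw [pvGP]

theorem pvGP_cons (p : String → Bool) (x : String) (xs : List String) :
    pvGP p (x :: xs) =
      if p x then
        (x :: xs.takeWhile (fun s => !p s)) :: pvGP p (xs.dropWhile (fun s => !p s))
      else pvGP p xs := by
  rw [pvGP]

-- B's generic loop step
def pvStepP (p : String → Bool) (st : List (List String) × Option (List String)) (line : String) :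
    List (List String) × Option (List String) :=
  if p line then
    match st.2 with
    | some cur => (st.1 ++ [cur], some [line])
    | none => (st.1, some [line])
  else
    match st.2 with
    | some cur => (st.1, some (cur ++ [line]))
    | none => st

def pvFinish (st : List (List String) × Option (List String)) : List (List String) :=
  match st.2 with
  | some cur => st.1 ++ [cur]
  | none => st.1

theorem pvB_open (p : String → Bool) (xs : List String) :
    ∀ (segs : List (List String)) (cur : List String),
    pvFinish (xs.foldl (pvStepP p) (segs, some cur)) =
      segs ++ (cur ++ xs.takeWhile (fun s => !p s)) :: pvGP p (xs.dropWhile (fun s => !p s)) := by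
  induction xs with
  | nil => intro segs cur; simp [pvFinish, pvGP_nil]
  | cons x xs ih =>
    intro segs cur
    by_cases hx : p x
    · rw [List.foldl_cons, show pvStepP p (segs, some cur) x = (segs ++ [cur], some [x]) from by
        simp [pvStepP, hx], ih, List.takeWhile_cons, List.dropWhile_cons]
      simp [hx, pvGP_cons]
    · have hx' : p x = false := by simpa using hx
      rw [List.foldl_cons, show pvStepP p (segs, some cur) x = (segs, some (cur ++ [x])) from by
        simp [pvStepP, hx'], ih, List.takeWhile_cons, List.dropWhile_cons]
      simp [hx']

theorem pvB_closed (p : String → Bool) (xs : List String) : ∀ (segs : List (List String)),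
    pvFinish (xs.foldl (pvStepP p) (segs, none)) = segs ++ pvGP p xs := by
  induction xs with
  | nil => intro segs; simp [pvFinish, pvGP_nil]
  | cons x xs ih =>
    intro segs
    by_cases hx : p x
    · rw [List.foldl_cons, show pvStepP p (segs, none) x = (segs, some [x]) from by
        simp [pvStepP, hx], pvB_open, pvGP_cons]
      simp [hx]
    · have hx' : p x = false := by simpa using hx
      rw [List.foldl_cons, show pvStepP p (segs, none) x = (segs, none) from by
        simp [pvStepP, hx'], ih, pvGP_cons]
      simp [hx']

theorem pvB_eq (xs : List String) :
    segment_instructions_alt xs = pvGP (fun s => PySem.Str.isIn "inp" s) xs := by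
  have h := pvB_closed (fun s => PySem.Str.isIn "inp" s) xs []
  rw [show pvStepP (fun s => PySem.Str.isIn "inp" s) = pvStepB from rfl] at h
  unfold pvFinish at h
  simpa [segment_instructions_alt] using h

-- index shift: prepending an element shifts all indices by one
theorem pvShift (xs : List String) (x : String) : ∀ (l : List Nat),
    pvF (x :: xs) (l.map (· + 1)) = pvF xs l := by
  intro l
  induction l with
  | nil => simp [pvF]
  | cons i l ih =>
    cases l with
    | nil => simp [pvF]
    | cons j rest =>
      simp only [List.map_cons] at ih ⊢
      rw [pvF, pvF, ih]
      simp [Nat.add_sub_add_right]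

theorem pvNilAll (p : String → Bool) (xs : List String) (h : pvIdxP p xs = []) :
    ∀ y ∈ xs, p y = false := by
  induction xs with
  | nil => simp
  | cons x xs ih =>
    by_cases hx : p x
    · rw [pvIdxP, if_pos hx] at h; exact absurd h (by simp)
    · rw [pvIdxP, if_neg hx, List.map_eq_nil_iff] at h
      intro y hy
      rcases List.mem_cons.mp hy with rfl | hy'
      · simpa using hx
      · exact ih h y hy'

theorem pvHeadTake (p : String → Bool) (xs : List String) : ∀ (j : Nat) (rest : List Nat),
    pvIdxP p xs = j :: rest → xs.takeWhile (fun s => !p s) = xs.take j := by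
  induction xs with
  | nil => intro j rest h; simp [pvIdxP] at h
  | cons x xs ih =>
    intro j rest h
    by_cases hx : p x
    · rw [pvIdxP, if_pos hx] at h
      injection h with h1 h2
      subst h1
      simp [hx]
    · rw [pvIdxP, if_neg hx] at h
      have hx' : p x = false := by simpa using hx
      cases hl : pvIdxP p xs with
      | nil => rw [hl] at h; simp at h
      | cons j' rest' =>
        rw [hl, List.map_cons] at h
        injection h with h1 h2
        subst h1
        simp [hx', ih j' rest' hl]

theorem pvGP_dropWhile (p : String → Bool) (xs : List String) :
    pvGP p (xs.dropWhile (fun s => !p s)) = pvGP p xs := by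
  induction xs with
  | nil => simp
  | cons x xs ih =>
    by_cases hx : p x
    · rw [List.dropWhile_cons]
      simp [hx]
    · have hx' : p x = false := by simpa using hx
      rw [List.dropWhile_cons, pvGP_cons]
      simp [hx', ih]

theorem pvMain (p : String → Bool) (xs : List String) : pvF xs (pvIdxP p xs) = pvGP p xs := by
  induction xs with
  | nil => simp [pvIdxP, pvF, pvGP_nil]
  | cons x xs ih =>
    by_cases hx : p x
    · rw [pvIdxP, if_pos hx, pvGP_cons, if_pos hx]
      cases hl : pvIdxP p xs with
      | nil =>
        have hall := pvNilAll p xs hl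
        have htake : xs.takeWhile (fun s => !p s) = xs :=
          List.takeWhile_eq_self_iff.mpr (fun y hy => by simp [hall y hy])
        have hdrop : xs.dropWhile (fun s => !p s) = [] :=
          List.dropWhile_eq_nil_iff.mpr (fun y hy => by simp [hall y hy])
        rw [htake, hdrop, pvGP_nil]
        simp [pvF]
      | cons j rest =>
        rw [List.map_cons, pvF,
          show ((j + 1) :: rest.map (· + 1)) = (j :: rest).map (· + 1) from rfl,
          pvShift xs x (j :: rest), ← hl, ih,
          pvHeadTake p xs j rest hl, pvGP_dropWhile]
        simp
    · rw [pvIdxP, if_neg hx, pvGP_cons, if_neg hx, pvShift xs x (pvIdxP p xs), ih]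

-- A's filtered enumerate is pvIdxP shifted by the start
theorem pvEnum (p : String → Bool) (xs : List String) : ∀ (s : Int),
    ((PySem.List.enumerate xs s).filter (fun iv => p iv.2)).map (fun iv => iv.1)
      = (pvIdxP p xs).map (fun (k : Nat) => s + (k : Int)) := by
  induction xs with
  | nil => intro s; simp [PySem.List.enumerate_nil, pvIdxP]
  | cons x xs ih =>
    intro s
    rw [PySem.List.enumerate_cons]
    by_cases hx : p x
    · rw [pvIdxP, if_pos hx]
      simp only [List.filter_cons, hx, if_pos, List.map_cons, ih (s + 1), List.map_map]
      congr 1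
      · simp
      · exact List.map_congr_left (fun k _ => by simp only [Function.comp_apply]; push_cast; ring)
    · have hx' : p x = false := by simpa using hx
      rw [pvIdxP, if_neg hx]
      simp only [List.filter_cons, hx', Bool.false_eq_true, if_false, ih (s + 1), List.map_map]
      exact List.map_congr_left (fun k _ => by simp only [Function.comp_apply]; push_cast; ring)

-- one element of A's loop
def pvSliceAt (xs : List String) (m : List Int) (k : Int) : List String :=
  if k < PySem.List.len m - 1 then
    PySem.List.slice xs (some (PySem.List.pyGetD m k 0)) (some (PySem.List.pyGetD m (k + 1) 0))
  else
    PySem.List.slice xs (some (PySem.List.pyGetD m k 0)) none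

theorem pvSliceShift (xs : List String) (c : Int) (m : List Int) (k : Nat) :
    pvSliceAt xs (c :: m) (((k + 1 : Nat)) : Int) = pvSliceAt xs m ((k : Nat) : Int) := by
  unfold pvSliceAt
  have hc : ((((k + 1 : Nat)) : Int) < PySem.List.len (c :: m) - 1)
      ↔ (((k : Nat) : Int) < PySem.List.len m - 1) := by
    simp only [PySem.List.len_eq, List.length_cons]
    push_cast
    omega
  have h1 : PySem.List.pyGetD (c :: m) (((k + 1 : Nat)) : Int) 0
      = PySem.List.pyGetD m ((k : Nat) : Int) 0 := by
    rw [PySem.List.pyGetD_natCast, PySem.List.pyGetD_natCast, List.getD_cons_succ]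
  have h2 : PySem.List.pyGetD (c :: m) ((((k + 1 : Nat)) : Int) + 1) 0
      = PySem.List.pyGetD m (((k : Nat) : Int) + 1) 0 := by
    rw [show (((k + 1 : Nat) : Int) + 1) = ((k + 2 : Nat) : Int) from by push_cast; ring,
      show (((k : Nat) : Int) + 1) = ((k + 1 : Nat) : Int) from by push_cast; ring,
      PySem.List.pyGetD_natCast, PySem.List.pyGetD_natCast, List.getD_cons_succ]
  rw [h1, h2]
  by_cases h : ((k : Nat) : Int) < PySem.List.len m - 1
  · rw [if_pos (hc.mpr h), if_pos h]
  · rw [if_neg (fun hh => h (hc.mp hh)), if_neg h]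

theorem pvRangeSlices (xs : List String) : ∀ (l : List Nat),
    (List.range l.length).map
      (fun (k : Nat) => pvSliceAt xs (l.map (fun (n : Nat) => (n : Int))) ((k : Nat) : Int))
      = pvF xs l := by
  intro l
  induction l with
  | nil => simp [pvF]
  | cons i l ih =>
    rw [List.length_cons, List.range_succ_eq_map, List.map_cons, List.map_map]
    have htail : ∀ (k : Nat),
        pvSliceAt xs ((i :: l).map (fun (n : Nat) => (n : Int))) ((k + 1 : Nat) : Int)
          = pvSliceAt xs (l.map (fun (n : Nat) => (n : Int))) ((k : Nat) : Int) := by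
      intro k
      exact pvSliceShift xs (i : Int) (l.map (fun (n : Nat) => (n : Int))) k
    cases l with
    | nil =>
      simp only [List.length_nil, List.range_zero, List.map_nil]
      rw [show pvSliceAt xs ([i].map (fun (n : Nat) => (n : Int))) ((0 : Nat) : Int)
          = xs.drop i from by
        unfold pvSliceAt
        rw [if_neg (by simp [PySem.List.len_eq])]
        rw [show PySem.List.pyGetD ([i].map (fun (n : Nat) => (n : Int))) ((0 : Nat) : Int) 0
            = ((i : Nat) : Int) from by rw [PySem.List.pyGetD_natCast]; rfl]
        exact PySem.List.slice_from_natCast xs i]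
      simp [pvF]
    | cons j rest =>
      rw [show pvSliceAt xs ((i :: j :: rest).map (fun (n : Nat) => (n : Int))) ((0 : Nat) : Int)
          = (xs.drop i).take (j - i) from by
        unfold pvSliceAt
        rw [if_pos (by simp only [PySem.List.len_eq, List.length_map, List.length_cons]; push_cast; omega)]
        rw [show PySem.List.pyGetD ((i :: j :: rest).map (fun (n : Nat) => (n : Int))) ((0 : Nat) : Int) 0
            = ((i : Nat) : Int) from by rw [PySem.List.pyGetD_natCast]; rfl]
        rw [show (((0 : Nat) : Int) + 1) = ((1 : Nat) : Int) from by norm_num]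
        rw [show PySem.List.pyGetD ((i :: j :: rest).map (fun (n : Nat) => (n : Int))) ((1 : Nat) : Int) 0
            = ((j : Nat) : Int) from by rw [PySem.List.pyGetD_natCast]; rfl]
        exact PySem.List.slice_natCast xs i j]
      rw [pvF]
      congr 1
      rw [← ih]
      apply List.map_congr_left
      intro k _
      simp only [Function.comp]
      exact htail k

theorem pvA_eq (xs : List String) :
    segment_instructions xs = pvF xs (pvIdxP (fun s => PySem.Str.isIn "inp" s) xs) := by
  simp only [segment_instructions]
  rw [pvEnum (fun s => PySem.Str.isIn "inp" s) xs 0]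
  rw [show (fun (k : Nat) => (0 : Int) + (k : Int)) = (fun (n : Nat) => (n : Int)) from by
    funext k; ring]
  generalize pvIdxP (fun s => PySem.Str.isIn "inp" s) xs = l
  rw [show (fun (segments : List (List String)) (i : Int) =>
      if i < PySem.List.len (l.map (fun (n : Nat) => (n : Int))) - 1 then
        segments ++ [PySem.List.slice xs
          (some (PySem.List.pyGetD (l.map (fun (n : Nat) => (n : Int))) i 0))
          (some (PySem.List.pyGetD (l.map (fun (n : Nat) => (n : Int))) (i + 1) 0))]
      else
        segments ++ [PySem.List.slice xs
          (some (PySem.List.pyGetD (l.map (fun (n : Nat) => (n : Int))) i 0)) none])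
    = (fun segments i => segments ++ [pvSliceAt xs (l.map (fun (n : Nat) => (n : Int))) i]) from by
    funext segments i; unfold pvSliceAt; split <;> rfl]
  rw [PySem.List.foldl_append_singleton_eq_map, List.nil_append]
  rw [show PySem.List.len (l.map (fun (n : Nat) => (n : Int))) = ((l.length : Nat) : Int) from by
    simp [PySem.List.len_eq]]
  rw [PySem.List.pyRange_one, List.map_map]
  rw [show ((((l.length : Nat) : Int)) - 0).toNat = l.length from by omega]
  rw [← pvRangeSlices xs l]
  apply List.map_congr_left
  intro k _
  simp only [Function.comp, zero_add]

theorem pvA_eq_pvB (xs : List String) : segment_instructions xs = segment_instructions_alt xs := by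
  rw [pvA_eq, pvB_eq, pvMain]

-- ===== VERDICT (by name: the statement is the Claim_ definition above) =====
theorem segment_instructions_spec : Claim_equal_segment_instructions := by
  intro xs _
  exact pvA_eq_pvB xs
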